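-- pv_equiv track=rewrite | github.com/pclumson1/Python3_Algorithms | arraySegment.py | duplicatesOnSegment
-- ===== SOURCE A (Python) =====
-- def duplicatesOnSegment(a):
--   if not a or len(a) == 0:
--     return 0
--
--   counter = 0
--   for s in range(len(a) - 1): # O(n)
--     for e in range(s + 1, len(a)): # O(n)
--       sub = a[s:e + 1] # O(n)
--       unique = 0
--       dict = {}
--       for v in sub: # O(n)
--         if v in dict:
--           dict[v] += 1
--           unique -= 1
--         else:
--           dict[v] = 1
--           unique += 1
--       if unique <= 0:
--         counter += 1
--
--   return counter
-- ===== SOURCE B (Python) =====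
-- def duplicatesOnSegment(a):
--     n = len(a)
--     total = 0
--     for s in range(n):
--         cnt = {}
--         unique = 0
--         for i in range(s, n):
--             v = a[i]
--             if v in cnt:
--                 cnt[v] += 1
--                 unique -= 1
--             else:
--                 cnt[v] = 1
--                 unique += 1
--             if i > s and unique <= 0:
--                 total += 1
--     return total
-- ===== Notes on version B (the rewrite author's own statement) =====
-- stated objective: faster
-- what changed: Instead of re-slicing and re-counting every subarray from scratch, B fixes each start and extends the end one element at a time, maintaining a running count dict and distinct/duplicate score incrementally.
import Mathlib
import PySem

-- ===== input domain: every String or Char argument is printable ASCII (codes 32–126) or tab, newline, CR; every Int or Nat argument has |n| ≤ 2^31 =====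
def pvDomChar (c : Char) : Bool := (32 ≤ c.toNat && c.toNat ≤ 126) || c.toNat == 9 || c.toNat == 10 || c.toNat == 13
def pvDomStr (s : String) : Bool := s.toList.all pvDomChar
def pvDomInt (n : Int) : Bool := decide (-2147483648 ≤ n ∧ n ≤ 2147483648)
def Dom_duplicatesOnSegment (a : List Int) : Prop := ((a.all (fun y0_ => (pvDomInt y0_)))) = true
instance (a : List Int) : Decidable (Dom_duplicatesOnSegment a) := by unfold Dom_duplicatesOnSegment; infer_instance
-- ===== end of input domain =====

-- ===== PORT A =====
-- B replaces A's from-scratch re-count of every slice by an incremental per-start scan (asymptotically faster).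
def duplicatesOnSegment (a : List Int) : Int :=
  if a = [] ∨ (a.length : Int) = 0 then 0
  else
    (PySem.List.pyRange 0 ((a.length : Int) - 1) 1).foldl (fun counter s =>
      (PySem.List.pyRange (s + 1) (a.length : Int) 1).foldl (fun counter e =>
        let sub := PySem.List.slice a (some s) (some (e + 1))
        let r := sub.foldl
          (fun (st : PySem.Dict Int Int × Int) v =>
            if st.1.contains v then (st.1.modify v 0 (fun c => c + 1), st.2 - 1)
            else (st.1.insert v 1, st.2 + 1))
          (PySem.Dict.empty, 0)
        if r.2 ≤ 0 then counter + 1 else counter) counter) 0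

-- ===== PORT B =====
def duplicatesOnSegment_alt (a : List Int) : Int :=
  let n : Int := (a.length : Int)
  (PySem.List.pyRange 0 n 1).foldl (fun total s =>
    ((PySem.List.pyRange s n 1).foldl
      (fun (st : (PySem.Dict Int Int × Int) × Int) i =>
        let v := PySem.List.pyGetD a i 0
        let st' := if st.1.1.contains v then (st.1.1.modify v 0 (fun c => c + 1), st.1.2 - 1)
                   else (st.1.1.insert v 1, st.1.2 + 1)
        (st', if s < i ∧ st'.2 ≤ 0 then st.2 + 1 else st.2))
      ((PySem.Dict.empty, 0), total)).2) 0

-- ===== PRECONDITION & SPEC =====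
def Spec_duplicatesOnSegment (a : List Int) (out : Int) : Prop := out = duplicatesOnSegment_alt a
instance (a : List Int) (out : Int) : Decidable (Spec_duplicatesOnSegment a out) := by unfold Spec_duplicatesOnSegment; infer_instance

-- ===== CLAIM (what is proved, stated in full; the proofs are below) =====
def Claim_equal_duplicatesOnSegment : Prop := ∀ (a : List Int), Dom_duplicatesOnSegment a → Spec_duplicatesOnSegment a (duplicatesOnSegment a)

-- ===== LEMMAS AND PROOFS =====

def dstep : (PySem.Dict Int Int × Int) → Int → (PySem.Dict Int Int × Int) :=
  fun st v =>
    if st.1.contains v then (st.1.modify v 0 (fun c => c + 1), st.2 - 1)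
    else (st.1.insert v 1, st.2 + 1)
def runSeg (a : List Int) (s m : Nat) : PySem.Dict Int Int × Int :=
  ((a.drop s).take (m - s)).foldl dstep (PySem.Dict.empty, 0)

lemma runSeg_succ (a : List Int) (s m : Nat) (hs : s ≤ m) (hm : m < a.length) :
    runSeg a s (m + 1) = dstep (runSeg a s m) (PySem.List.pyGetD a (m : Int) 0) := by
  unfold runSeg
  have h1 : m + 1 - s = (m - s) + 1 := by omega
  rw [h1, List.take_add_one, List.foldl_append, PySem.List.pyGetD_natCast]
  have h2 : (a.drop s)[m - s]? = some (a.getD m 0) := by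
    rw [List.getElem?_drop]
    have : s + (m - s) = m := by omega
    rw [this, List.getElem?_eq_getElem hm, List.getD_eq_getElem a 0 hm]
  rw [h2]
  rfl

def bodyA (a : List Int) (s : Int) : Int → Int → Int :=
  fun counter e =>
    let sub := PySem.List.slice a (some s) (some (e + 1))
    let r := sub.foldl dstep (PySem.Dict.empty, 0)
    if r.2 ≤ 0 then counter + 1 else counter

lemma bodyA_eq (a : List Int) (s m : Nat) (t : Int) :
    bodyA a (s : Int) t (m : Int) = if (runSeg a s (m + 1)).2 ≤ 0 then t + 1 else t := by
  unfold bodyA runSeg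
  have h1 : ((m : Int) + 1) = ((m + 1 : Nat) : Int) := by push_cast; ring
  rw [h1, PySem.List.slice_natCast]

def bodyB (a : List Int) (s : Int) : ((PySem.Dict Int Int × Int) × Int) → Int → ((PySem.Dict Int Int × Int) × Int) :=
  fun st i =>
    let v := PySem.List.pyGetD a i 0
    let st' := dstep st.1 v
    (st', if s < i ∧ st'.2 ≤ 0 then st.2 + 1 else st.2)

lemma Lmain (a : List Int) (s k : Nat) : ∀ (m : Nat) (t : Int), s < m → m + k ≤ a.length →
    (PySem.List.pyRange (m : Int) ((m + k : Nat) : Int) 1).foldl (bodyB a (s : Int)) (runSeg a s m, t)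
    = (runSeg a s (m + k), (PySem.List.pyRange (m : Int) ((m + k : Nat) : Int) 1).foldl (bodyA a (s : Int)) t) := by
  induction k with
  | zero =>
    intro m t _ _
    simp only [Nat.add_zero]
    rw [PySem.List.pyRange_one_eq_nil (le_refl _)]
    simp
  | succ k ih =>
    intro m t hsm hlen
    have hcons : PySem.List.pyRange (m : Int) ((m + (k + 1) : Nat) : Int) 1
        = (m : Int) :: PySem.List.pyRange ((m : Int) + 1) ((m + (k + 1) : Nat) : Int) 1 := by
      apply PySem.List.pyRange_one_cons
      exact_mod_cast Nat.lt_add_of_pos_right (by omega)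
    have hstep : bodyB a (s : Int) (runSeg a s m, t) (m : Int)
        = (runSeg a s (m + 1), if (runSeg a s (m + 1)).2 ≤ 0 then t + 1 else t) := by
      simp only [bodyB]
      rw [← runSeg_succ a s m (by omega) (by omega)]
      have hlt : ((s : Int) < (m : Int)) = True := by simp; exact_mod_cast hsm
      simp [hlt]
    have hA : bodyA a (s : Int) t (m : Int) = if (runSeg a s (m + 1)).2 ≤ 0 then t + 1 else t :=
      bodyA_eq a s m t
    have hc1 : ((m : Int) + 1) = ((m + 1 : Nat) : Int) := by push_cast; ring
    have hc2 : (m + (k + 1)) = ((m + 1) + k) := by omega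
    rw [hcons, List.foldl_cons, List.foldl_cons, hstep, hA, hc1, hc2]
    exact ih (m + 1) _ (by omega) (by omega)

lemma Bouter (a : List Int) (s : Nat) (hs : s < a.length) (t : Int) :
    ((PySem.List.pyRange (s : Int) (a.length : Int) 1).foldl (bodyB a (s : Int)) ((PySem.Dict.empty, 0), t)).2
    = (PySem.List.pyRange ((s : Int) + 1) (a.length : Int) 1).foldl (bodyA a (s : Int)) t := by
  have hcons : PySem.List.pyRange (s : Int) (a.length : Int) 1
      = (s : Int) :: PySem.List.pyRange ((s : Int) + 1) (a.length : Int) 1 := by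
    apply PySem.List.pyRange_one_cons
    exact_mod_cast hs
  have h0 : runSeg a s s = (PySem.Dict.empty, 0) := by
    unfold runSeg; simp
  have hstep : bodyB a (s : Int) ((PySem.Dict.empty, 0), t) (s : Int) = (runSeg a s (s + 1), t) := by
    simp only [bodyB]
    rw [← h0, ← runSeg_succ a s s (le_refl s) hs]
    simp
  have hc1 : ((s : Int) + 1) = ((s + 1 : Nat) : Int) := by push_cast; ring
  have hc2 : (a.length : Int) = (((s + 1) + (a.length - s - 1) : Nat) : Int) := by push_cast; omega
  rw [hcons, List.foldl_cons, hstep, hc1, hc2,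
    Lmain a s (a.length - s - 1) (s + 1) t (by omega) (by omega)]


lemma altEq (a : List Int) : duplicatesOnSegment_alt a
    = (PySem.List.pyRange 0 (a.length : Int) 1).foldl
        (fun total s => ((PySem.List.pyRange s (a.length : Int) 1).foldl (bodyB a s) ((PySem.Dict.empty, 0), total)).2) 0 := rfl

lemma AEq (a : List Int) (h : ¬(a = [] ∨ (a.length : Int) = 0)) : duplicatesOnSegment a
    = (PySem.List.pyRange 0 ((a.length : Int) - 1) 1).foldl
        (fun c s => (PySem.List.pyRange (s + 1) (a.length : Int) 1).foldl (bodyA a s) c) 0 := by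
  unfold duplicatesOnSegment
  rw [if_neg h]
  rfl

-- ===== VERDICT (by name: the statement is the Claim_ definition above) =====
theorem duplicatesOnSegment_spec : Claim_equal_duplicatesOnSegment := by
  intro a _
  unfold Spec_duplicatesOnSegment
  by_cases h : a = []
  · subst h; rfl
  · have hn : 1 ≤ a.length := by
      cases a with
      | nil => exact absurd rfl h
      | cons x xs => simp
    have hne : ¬(a = [] ∨ (a.length : Int) = 0) := by simp [h]
    rw [AEq a hne, altEq]
    have hsplit : PySem.List.pyRange 0 (a.length : Int) 1
        = PySem.List.pyRange 0 ((a.length : Int) - 1) 1 ++ [(a.length : Int) - 1] := by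
      have h2 := PySem.List.pyRange_one_succ_right (a := 0) (b := (a.length : Int) - 1) (by omega)
      rw [show ((a.length : Int) - 1) + 1 = (a.length : Int) by ring] at h2
      exact h2
    rw [hsplit, List.foldl_append]
    -- the last start s = n-1 contributes nothing on B's side
    have hlast : ∀ t : Int,
        ((PySem.List.pyRange ((a.length : Int) - 1) (a.length : Int) 1).foldl (bodyB a ((a.length : Int) - 1))
          ((PySem.Dict.empty, 0), t)).2 = t := by
      intro t
      have : PySem.List.pyRange ((a.length : Int) - 1) (a.length : Int) 1 = [(a.length : Int) - 1] := by
        have h2 := PySem.List.pyRange_one_singleton ((a.length : Int) - 1)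
        rw [show ((a.length : Int) - 1) + 1 = (a.length : Int) by ring] at h2
        exact h2
      rw [this]
      simp [bodyB]
    rw [List.foldl_cons, List.foldl_nil, hlast]
    -- on the common range the bodies agree (Bouter)
    apply List.foldl_ext
    intro t s hs
    rw [PySem.List.mem_pyRange_one] at hs
    obtain ⟨hs0, hs1⟩ := hs
    have hsn : s = ((s.toNat : Nat) : Int) := by omega
    rw [hsn]
    rw [Bouter a s.toNat (by omega) t]
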